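-- pv_equiv track=rewrite | github.com/maciejmiklas/jetman-in-space | tools/enemyTrajectoryEditor/main.py | ToBase2
-- ===== SOURCE A (Python) =====
-- def ToBase2(num):
--     if num > 7:
--         num = 7
--     if (num < 0):
--         test = -num // 2
--         wynik = str(int(-num % 2))
--     else:
--         test = num // 2
--         wynik = str(int(num % 2))
--
--     while test > 0:
--         wynik = str(int(test % 2)) + wynik
--         test = test//2
--     return ('0' * (3 - len(wynik))) + wynik
-- ===== SOURCE B (Python) =====
-- def ToBase2(num):
--     if num > 7:
--         num = 7
--     s = format(abs(num), 'b')
--     return '0' * (3 - len(s)) + s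
-- ===== Notes on version B (the rewrite author's own statement) =====
-- stated objective: idiomatic
-- what changed: The manual sign-split and the repeated modulus/halving digit-prepending while-loop are replaced by a single builtin base conversion of the capped magnitude, followed by the same left zero-pad to minimum width three.
import Mathlib
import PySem

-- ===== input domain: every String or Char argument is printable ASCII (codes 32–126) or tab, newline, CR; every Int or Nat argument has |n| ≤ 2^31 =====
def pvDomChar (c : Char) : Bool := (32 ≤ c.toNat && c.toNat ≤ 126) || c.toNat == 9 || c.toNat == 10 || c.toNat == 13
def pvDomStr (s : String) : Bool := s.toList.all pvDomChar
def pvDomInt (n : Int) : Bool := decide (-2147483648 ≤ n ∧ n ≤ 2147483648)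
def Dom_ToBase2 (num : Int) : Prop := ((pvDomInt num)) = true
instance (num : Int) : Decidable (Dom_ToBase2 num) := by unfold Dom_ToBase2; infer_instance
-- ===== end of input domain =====

-- B replaces A's sign-split and manual %2///2 digit-prepend loop with one builtin
-- base conversion of the capped magnitude plus the same width-3 left pad (idiomatic).


-- ===== PORT A =====
-- while test > 0: wynik = str(int(test % 2)) + wynik; test = test//2
def toBase2Loop (test : Int) (wynik : String) : String :=
  if h : test > 0 then
    toBase2Loop (PySem.Int.floordiv test 2) (PySem.Int.toStr (PySem.Int.mod test 2) ++ wynik)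
  else wynik
termination_by test.toNat
decreasing_by
  have := PySem.Int.floordiv_eq_ediv_of_pos (a := test) (b := 2) (by omega)
  omega

def ToBase2 (num : Int) : String :=
  let num := if num > 7 then 7 else num
  let tw : Int × String :=
    if num < 0 then (PySem.Int.floordiv (-num) 2, PySem.Int.toStr (PySem.Int.mod (-num) 2))
    else (PySem.Int.floordiv num 2, PySem.Int.toStr (PySem.Int.mod num 2))
  let wynik := toBase2Loop tw.1 tw.2
  String.mk (List.replicate (3 - wynik.toList.length) '0') ++ wynik

-- ===== PORT B =====
-- format(n, 'b') for a natural number (no Lean builtin; exact binary, MSB first)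
def binFmt (n : Nat) : String :=
  if h : n < 2 then (if n = 1 then "1" else "0")
  else binFmt (n / 2) ++ (if n % 2 = 1 then "1" else "0")
termination_by n
decreasing_by omega

def ToBase2_alt (num : Int) : String :=
  let num := if num > 7 then 7 else num
  let s := binFmt num.natAbs
  String.mk (List.replicate (3 - s.toList.length) '0') ++ s

-- ===== PRECONDITION & SPEC =====
def Spec_ToBase2 (num : Int) (out : String) : Prop := out = ToBase2_alt num
instance (num : Int) (out : String) : Decidable (Spec_ToBase2 num out) := by unfold Spec_ToBase2; infer_instance

-- ===== CLAIM (what is proved, stated in full; the proofs are below) =====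
def Claim_equal_ToBase2 : Prop := ∀ (num : Int), Dom_ToBase2 num → Spec_ToBase2 num (ToBase2 num)

-- ===== LEMMAS AND PROOFS =====
def digitStr (b : Nat) : String := if b = 1 then "1" else "0"

lemma toStr_mod2 (n : Nat) : PySem.Int.toStr ((n % 2 : Nat) : Int) = digitStr (n % 2) := by
  rcases Nat.mod_two_eq_zero_or_one n with h | h <;> rw [h] <;> decide

lemma binFmt_zero : binFmt 0 = "0" := by rw [binFmt]; norm_num
lemma binFmt_one : binFmt 1 = "1" := by rw [binFmt]; norm_num

lemma binFmt_step (n : Nat) (h : ¬ n < 2) : binFmt n = binFmt (n / 2) ++ digitStr (n % 2) := by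
  rw [binFmt, dif_neg h]
  congr 1

lemma loop_gen (t : Nat) (w : String) :
    toBase2Loop ((t : Nat) : Int) w = if t = 0 then w else binFmt t ++ w := by
  induction t using Nat.strong_induction_on generalizing w with
  | _ t ih =>
    rw [toBase2Loop]
    by_cases h0 : t = 0
    · subst h0; rw [dif_neg (by omega), if_pos rfl]
    · rw [dif_pos (by exact_mod_cast Nat.pos_of_ne_zero h0), if_neg h0]
      have hf : PySem.Int.floordiv ((t : Nat) : Int) 2 = ((t / 2 : Nat) : Int) := by
        exact_mod_cast PySem.Int.floordiv_natCast t 2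
      have hm : PySem.Int.mod ((t : Nat) : Int) 2 = ((t % 2 : Nat) : Int) := by
        exact_mod_cast PySem.Int.mod_natCast t 2
      rw [hf, hm, toStr_mod2, ih (t / 2) (by omega)]
      by_cases h2 : t < 2
      · have ht : t = 1 := by omega
        subst ht
        rw [binFmt_one]
        rfl
      · rw [if_neg (by omega : ¬ t / 2 = 0), binFmt_step t h2, String.append_assoc]

lemma loop_core (n : Nat) : toBase2Loop ((n / 2 : Nat) : Int) (digitStr (n % 2)) = binFmt n := by
  rw [loop_gen]
  by_cases h2 : n < 2
  · rw [if_pos (by omega)]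
    interval_cases n
    · rw [binFmt_zero]; rfl
    · rw [binFmt_one]; rfl
  · rw [if_neg (by omega), ← binFmt_step n h2]

lemma main_nonneg (n : Nat) :
    toBase2Loop (PySem.Int.floordiv (n : Int) 2) (PySem.Int.toStr (PySem.Int.mod (n : Int) 2)) = binFmt n := by
  have hf : PySem.Int.floordiv (n : Int) 2 = ((n / 2 : Nat) : Int) := by
    exact_mod_cast PySem.Int.floordiv_natCast n 2
  have hm : PySem.Int.mod (n : Int) 2 = ((n % 2 : Nat) : Int) := by
    exact_mod_cast PySem.Int.mod_natCast n 2
  rw [hf, hm, toStr_mod2, loop_core]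

-- ===== VERDICT (by name: the statement is the Claim_ definition above) =====
theorem ToBase2_spec : Claim_equal_ToBase2 := by
  intro num _
  unfold Spec_ToBase2 ToBase2 ToBase2_alt
  by_cases h7 : num > 7
  · simp only [if_pos h7]
    rw [show (7:Int) = ((7:Nat):Int) from rfl]
    simp only [if_neg (by norm_num : ¬ ((7:Nat):Int) < 0), main_nonneg 7]
    rfl
  · simp only [if_neg h7]
    by_cases hneg : num < 0
    · simp only [if_pos hneg]
      have h : -num = ((num.natAbs : Nat) : Int) := by omega
      rw [h]
      simp only [main_nonneg num.natAbs]
    · simp only [if_neg hneg]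
      have h : num = ((num.natAbs : Nat) : Int) := by omega
      rw [h]
      rw [main_nonneg num.natAbs, Int.natAbs_natCast]
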